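-- pv_equiv track=rewrite | github.com/CyriacAzefack/Frailty_Box | Data_Drift/Drift_Detector.py | window_separation
-- ===== SOURCE A (Python) =====
-- def window_separation(array):
--     result = []
--     c = None
--     interval = []
--     for x in array:
--         if c is None:
--             interval.append(x)
--             c = x
--             continue
--
--         if x - c > 1:
--             if c == interval[0]:
--                 c += 1
--             interval.append(c)
--             result.append(interval)
--             interval = [x]
--         c = x
--
--     interval.append(c)
--     result.append(interval)
--
--     return result
-- ===== SOURCE B (Python) =====
-- def window_separation(array):
--     if not array:
--         return [[None]]
--     # pass 1: split into segments at gaps > 1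
--     segments = [[array[0]]]
--     for prev, x in zip(array, array[1:]):
--         if x - prev > 1:
--             segments.append([x])
--         else:
--             segments[-1].append(x)
--     # pass 2: each segment -> [start, end]; non-final single-value runs are bumped
--     out = []
--     for seg in segments[:-1]:
--         end = seg[-1]
--         if end == seg[0]:
--             end = seg[0] + 1
--         out.append([seg[0], end])
--     last = segments[-1]
--     out.append([last[0], last[-1]])
--     return out
-- ===== Notes on version B (the rewrite author's own statement) =====
-- stated objective: alternative
-- what changed: B replaces A's single fused loop carrying (result, prev, open interval) with two separate passes: first split the array into segments at gaps > 1, then map each segment to [start, end] (bumping only non-final single-value segments).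
-- outside the precondition, e.g. on window_separation([]): A returns [[None]], B returns [[None]]
import Mathlib
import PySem

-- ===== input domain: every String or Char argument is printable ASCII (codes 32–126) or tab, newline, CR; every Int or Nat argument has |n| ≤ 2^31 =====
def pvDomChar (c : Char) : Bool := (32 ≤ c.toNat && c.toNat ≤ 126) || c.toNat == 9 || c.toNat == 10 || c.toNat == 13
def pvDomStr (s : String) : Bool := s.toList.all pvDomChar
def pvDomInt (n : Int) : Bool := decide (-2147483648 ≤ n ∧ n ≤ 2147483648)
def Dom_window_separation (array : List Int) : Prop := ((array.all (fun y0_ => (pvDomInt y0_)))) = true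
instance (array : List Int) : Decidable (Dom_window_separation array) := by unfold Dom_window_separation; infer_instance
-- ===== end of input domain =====

-- B is a two-pass decomposition (segment, then map to [start,end]); the proved equivalence is on nonempty arrays.

-- ===== PORT A =====
-- A's loop state: (result, c : Option Int, interval); interval[0] read as headD 0
-- (interval is nonempty whenever c is some, so the default is never used on admitted inputs).
def windowSepStepA (st : List (List Int) × Option Int × List Int) (x : Int) :
    List (List Int) × Option Int × List Int :=
  match st with
  | (result, none, interval) => (result, some x, interval ++ [x])
  | (result, some cv, interval) =>
    if x - cv > 1 then
      let cv' := if cv = interval.headD 0 then cv + 1 else cv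
      (result ++ [interval ++ [cv']], some x, [x])
    else (result, some x, interval)

def window_separation (array : List Int) : List (List Int) :=
  match array.foldl windowSepStepA ([], none, []) with
  | (result, some cv, interval) => result ++ [interval ++ [cv]]
  | (result, none, interval) => result ++ [interval]  -- empty array: Python appends None ([[None]]), outside Pre_

-- ===== PORT B =====
-- pass 1 step: extend the last segment, or start a new one at a gap > 1
def windowSepStepB (segs : List (List Int)) (pr : Int × Int) : List (List Int) :=
  if pr.2 - pr.1 > 1 then segs ++ [[pr.2]]
  else segs.dropLast ++ [segs.getLastD [] ++ [pr.2]]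

-- pass 2 for a non-final segment: [start, end] with the single-value bump
def windowSepBump (seg : List Int) : List Int :=
  let e := seg.getLastD 0
  [seg.headD 0, if e = seg.headD 0 then seg.headD 0 + 1 else e]

def window_separation_alt (array : List Int) : List (List Int) :=
  match array with
  | [] => []  -- Python B returns [[None]] here (same as A), not a List (List Int); outside Pre_
  | a :: rest =>
    let segs := ((a :: rest).zip rest).foldl windowSepStepB [[a]]
    let last := segs.getLastD []
    segs.dropLast.map windowSepBump ++ [[last.headD 0, last.getLastD 0]]

-- ===== PRECONDITION & SPEC =====
-- Pre_ excludes the empty array, on which both Pythons return [[None]] — not a value of the declared List[List[int]] type.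
def Pre_window_separation (array : List Int) : Prop := array ≠ []
instance (array : List Int) : Decidable (Pre_window_separation array) := by
  unfold Pre_window_separation; infer_instance

def pvWitness_window_separation : List Int := [1, 2, 5]

def Spec_window_separation (array : List Int) (out : List (List Int)) : Prop := out = window_separation_alt array
instance (array : List Int) (out : List (List Int)) : Decidable (Spec_window_separation array out) := by unfold Spec_window_separation; infer_instance

-- ===== CLAIM (what is proved, stated in full; the proofs are below) =====
def Claim_equal_window_separation : Prop := ∀ (array : List Int), Dom_window_separation array → Pre_window_separation array → Spec_window_separation array (window_separation array)

-- ===== LEMMAS AND PROOFS =====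

-- B's zip pairs, rewritten as a recursion carrying the previous element.
def windowSepPairs (prev : Int) (t : List Int) : List (Int × Int) :=
  match t with
  | [] => []
  | x :: t' => (prev, x) :: windowSepPairs x t'

theorem windowSepPairs_eq_zip (a : Int) (rest : List Int) :
    (a :: rest).zip rest = windowSepPairs a rest := by
  induction rest generalizing a with
  | nil => rfl
  | cons x t ih =>
    show (a, x) :: (x :: t).zip t = _
    rw [ih x]; rfl

theorem headD_concat (seg : List Int) (x d : Int) (h : seg ≠ []) :
    (seg ++ [x]).headD d = seg.headD d := by
  cases seg with
  | nil => exact absurd rfl h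
  | cons a t => rfl

-- Main loop invariant: with A's state (res, some c, [h]) and B's segments segs ++ [seg]
-- (seg the open segment, head h, last c, res the bumped images of segs), finishing the
-- remaining tail t gives the same answer on both sides.
theorem windowSep_loop (t : List Int) (res segs : List (List Int)) (seg : List Int) (h c : Int)
    (hne : seg ≠ []) (hh : seg.headD 0 = h) (hc : seg.getLastD 0 = c)
    (hres : res = segs.map windowSepBump) :
    (match t.foldl windowSepStepA (res, some c, [h]) with
      | (result, some cv, interval) => result ++ [interval ++ [cv]]
      | (result, none, interval) => result ++ [interval])
    = (let segs' := (windowSepPairs c t).foldl windowSepStepB (segs ++ [seg])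
       let last := segs'.getLastD []
       segs'.dropLast.map windowSepBump ++ [[last.headD 0, last.getLastD 0]]) := by
  induction t generalizing res segs seg h c with
  | nil =>
    simp only [List.foldl, windowSepPairs]
    rw [List.dropLast_concat, List.getLastD_concat]
    simp only [hres]
    rw [← hh, ← hc]
    rfl
  | cons x t' ih =>
    simp only [windowSepPairs, List.foldl]
    by_cases hgt : x - c > 1
    · have hstepA : windowSepStepA (res, some c, [h]) x
          = (res ++ [[h, if c = h then c + 1 else c]], some x, [x]) := by
        simp [windowSepStepA, hgt]
      have hstepB : windowSepStepB (segs ++ [seg]) (c, x) = (segs ++ [seg]) ++ [[x]] := by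
        simp [windowSepStepB, hgt]
      rw [hstepA, hstepB]
      have := ih (res ++ [[h, if c = h then c + 1 else c]]) (segs ++ [seg]) [x] x x
        (by simp) rfl rfl ?_
      · simpa using this
      · rw [hres]
        have hbump : windowSepBump seg = [h, if c = h then c + 1 else c] := by
          simp only [windowSepBump, hh, hc]
          by_cases he : c = h
          · simp [he]
          · simp [he]
        simp [hbump]
    · have hstepA : windowSepStepA (res, some c, [h]) x = (res, some x, [h]) := by
        simp [windowSepStepA, hgt]
      have hstepB : windowSepStepB (segs ++ [seg]) (c, x) = segs ++ [seg ++ [x]] := by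
        simp only [windowSepStepB]
        rw [if_neg (by simpa using hgt), List.dropLast_concat, List.getLastD_concat]
      rw [hstepA, hstepB]
      exact ih res segs (seg ++ [x]) h x (by simp)
        (by rw [headD_concat seg x 0 hne, hh]) (by rw [List.getLastD_concat]) hres

-- ===== VERDICT (by name: the statement is the Claim_ definition above) =====
theorem window_separation_spec : Claim_equal_window_separation := by
  intro array _ hpre
  unfold Spec_window_separation
  match array with
  | [] => exact absurd rfl hpre
  | a :: rest =>
    unfold window_separation window_separation_alt
    simp only [windowSepPairs_eq_zip]
    have h0 : windowSepStepA ([], none, []) a = ([], some a, [a]) := rfl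
    simp only [List.foldl, h0]
    have := windowSep_loop rest [] [] [a] a a (by simp) rfl rfl (by simp)
    simpa using this
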